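-- pv_equiv track=rewrite | github.com/paradiselabs-ai/MCO-Protocol | Gradio-Hackathon/mco-hackathon-final/gradio_ui.py | update_values_and_nlp
-- ===== SOURCE A (Python) =====
-- def parse_snlp_file(content):
--     """Parse SNLP file content into sections"""
--     sections = {}
--     current_section = None
--     current_content = []
--
--     lines = content.split("\n")
--     for line in lines:
--         if line.startswith("@"):
--             # Save previous section
--             if current_section:
--                 sections[current_section] = "\n".join(current_content)
--                 current_content = []
--
--             # Extract new section name
--             parts = line.split(" ", 1)
--             current_section = parts[0][1:]  # Remove the @ symbol
--
--             # If there's content after the section name, add it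
--             if len(parts) > 1:
--                 current_content.append(parts[1])
--         elif line.startswith(">"):
--             # NLP content
--             if current_section:
--                 current_content.append(line)
--         else:
--             # Regular content
--             if current_section:
--                 current_content.append(line)
--
--     # Save the last section
--     if current_section:
--         sections[current_section] = "\n".join(current_content)
--
--     return sections
--
-- def generate_snlp_file(sections, file_type):
--     """Generate SNLP file content from sections"""
--     content = f"// MCO {file_type.capitalize()}\n\n"
--
--     for section, section_content in sections.items():
--         content += f"@{section}\n"
--
--         # Split content into lines
--         lines = section_content.split("\n")
--         for line in lines:
--             if line.startswith(">"):
--                 # NLP content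
--                 content += f"{line}\n"
--             else:
--                 # Regular content
--                 content += f"{line}\n"
--
--         content += "\n"
--
--     return content
--
-- def update_values_and_nlp(content, values, nlp):
--     """Update SNLP file with new values and NLP content"""
--     sections = parse_snlp_file(content)
--     updated_sections = {}
--
--     for section, section_content in sections.items():
--         updated_content = []
--
--         # Add values
--         if section in values:
--             updated_content.append(values[section])
--
--         # Add NLP
--         if section in nlp:
--             nlp_lines = nlp[section].split("\n")
--             for line in nlp_lines:
--                 updated_content.append(f">{line}")
--
--         updated_sections[section] = "\n".join(updated_content)
--
--     # Generate updated file
--     file_type = "core"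
--     if "success_criteria" in sections:
--         file_type = "sc"
--     elif "feature" in content:
--         file_type = "features"
--     elif "style" in content:
--         file_type = "styles"
--
--     return generate_snlp_file(updated_sections, file_type)
-- ===== SOURCE B (Python) =====
-- def update_values_and_nlp(content, values, nlp):
--     """Update SNLP file with new values and NLP content (single parse pass + direct emit)"""
--     # ordered distinct non-empty section names, first occurrence wins
--     raw = [ln.split(" ", 1)[0][1:] for ln in content.split("\n") if ln.startswith("@")]
--     names = list(dict.fromkeys(n for n in raw if n))
--
--     if "success_criteria" in names:
--         ft = "Sc"
--     elif "feature" in content: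
--         ft = "Features"
--     elif "style" in content:
--         ft = "Styles"
--     else:
--         ft = "Core"
--
--     blocks = []
--     for s in names:
--         body = []
--         if s in values:
--             body.append(values[s])
--         if s in nlp:
--             body.extend(">" + l for l in nlp[s].split("\n"))
--         blocks.append("@" + s + "\n" + "\n".join(body) + "\n")
--     return "\n".join(["// MCO " + ft + "\n"] + blocks) + "\n"
-- ===== Notes on version B (the rewrite author's own statement) =====
-- stated objective: simpler
-- what changed: Replaces A's three-stage pipeline (parse into a content dict, rebuild an updated_sections dict, regenerate via a separate generator that re-splits each section body) by one pass that collects the ordered distinct non-empty section names and emits each block directly with a single join, dropping both intermediate dicts and the pointless identical if/else in the generator.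
import Mathlib
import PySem

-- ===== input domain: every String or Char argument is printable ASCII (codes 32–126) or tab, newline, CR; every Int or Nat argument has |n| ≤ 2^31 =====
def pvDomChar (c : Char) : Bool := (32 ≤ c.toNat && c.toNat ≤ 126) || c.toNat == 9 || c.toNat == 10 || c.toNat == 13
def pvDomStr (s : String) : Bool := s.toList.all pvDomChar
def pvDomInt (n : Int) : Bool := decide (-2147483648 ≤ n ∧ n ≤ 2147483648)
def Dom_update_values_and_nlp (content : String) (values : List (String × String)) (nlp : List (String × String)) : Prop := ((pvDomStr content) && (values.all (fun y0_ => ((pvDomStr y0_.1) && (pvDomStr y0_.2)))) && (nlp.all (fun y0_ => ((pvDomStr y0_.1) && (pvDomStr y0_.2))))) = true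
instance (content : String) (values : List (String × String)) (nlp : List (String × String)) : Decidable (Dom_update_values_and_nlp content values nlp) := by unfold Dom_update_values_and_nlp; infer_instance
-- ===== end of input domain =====

-- B re-implements A with one parse pass over the section names and direct block emission
-- (no intermediate dicts, no regeneration step): simpler, same O(n) cost.

-- ===== PORT A =====
-- shared helper: Python dict membership / lookup on the assoc-list arguments (first match)
def pvLookup? (xs : List (String × String)) (k : String) : Option String :=
  (xs.find? (fun p => p.1 == k)).map (·.2)

-- Python truthiness of current_section (None and "" are falsy)
def pvTruthy : Option String → Bool
  | none => false
  | some s => !(s == "")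

-- str.capitalize, ported by hand (PySem has no capitalize); exact for the ASCII strings of Dom
def pvCapitalize (s : String) : String :=
  match s.toList with
  | [] => ""
  | ch :: rest => String.ofList (PySem.Chars.upperChar ch :: PySem.Chars.lower rest)

-- loop body of parse_snlp_file: state = (sections, current_section, current_content)
def pvStep (st : PySem.Dict String String × Option String × List String) (line : String) :
    PySem.Dict String String × Option String × List String :=
  let (sections, cur, acc) := st
  if PySem.Str.startswith line "@" then
    let (sections, acc) :=
      if pvTruthy cur then (sections.insert (cur.getD "") (PySem.Str.join "\n" acc), ([] : List String))
      else (sections, acc)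
    let parts := (PySem.Str.splitMax? line " " 1).getD []   -- sep " " ≠ "" so never none
    let cur := some (PySem.Str.slice (parts.headD "") (some 1) none)
    let acc := if parts.length > 1 then acc ++ [parts.getD 1 ""] else acc
    (sections, cur, acc)
  else if PySem.Str.startswith line ">" then
    (if pvTruthy cur then (sections, cur, acc ++ [line]) else st)
  else
    (if pvTruthy cur then (sections, cur, acc ++ [line]) else st)

-- the trailing "save the last section"
def pvFinal (st : PySem.Dict String String × Option String × List String) : PySem.Dict String String :=
  if pvTruthy st.2.1 then st.1.insert (st.2.1.getD "") (PySem.Str.join "\n" st.2.2) else st.1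

def parse_snlp_file (content : String) : PySem.Dict String String :=
  pvFinal (((PySem.Str.split? content "\n").getD []).foldl pvStep (PySem.Dict.empty, none, []))

def generate_snlp_file (sections : PySem.Dict String String) (file_type : String) : String :=
  let content := "// MCO " ++ pvCapitalize file_type ++ "\n\n"
  sections.items.foldl (fun content p =>
    let content := content ++ "@" ++ p.1 ++ "\n"
    let lines := (PySem.Str.split? p.2 "\n").getD []
    let content := lines.foldl (fun content line =>
      if PySem.Str.startswith line ">" then content ++ (line ++ "\n") else content ++ (line ++ "\n")) content
    content ++ "\n") content

def update_values_and_nlp (content : String) (values : List (String × String)) (nlp : List (String × String)) : String :=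
  let sections := parse_snlp_file content
  let updated := sections.items.foldl (fun (u : PySem.Dict String String) p =>
    let updated_content : List String := []
    let updated_content := match pvLookup? values p.1 with
      | some v => updated_content ++ [v]
      | none => updated_content
    let updated_content := match pvLookup? nlp p.1 with
      | some t => updated_content ++ (((PySem.Str.split? t "\n").getD []).map (fun l => ">" ++ l))
      | none => updated_content
    u.insert p.1 (PySem.Str.join "\n" updated_content)) PySem.Dict.empty
  let file_type :=
    if sections.contains "success_criteria" then "sc"
    else if PySem.Str.isIn "feature" content then "features"
    else if PySem.Str.isIn "style" content then "styles"
    else "core"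
  generate_snlp_file updated file_type

-- ===== PORT B =====
-- ln.split(" ", 1)[0][1:]
def pvName (ln : String) : String :=
  PySem.Str.slice (((PySem.Str.splitMax? ln " " 1).getD []).headD "") (some 1) none

-- body lines of one emitted section block
def pvBlockBody (s : String) (values nlp : List (String × String)) : List String :=
  (match pvLookup? values s with
    | some v => [v]
    | none => []) ++
  (match pvLookup? nlp s with
    | some t => ((PySem.Str.split? t "\n").getD []).map (fun l => ">" ++ l)
    | none => [])

def update_values_and_nlp_alt (content : String) (values : List (String × String)) (nlp : List (String × String)) : String :=
  let lines := (PySem.Str.split? content "\n").getD []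
  let names := PySem.List.dedup
    (((lines.filter (fun ln => PySem.Str.startswith ln "@")).map pvName).filter (fun n => !(n == "")))
  let ft :=
    if names.contains "success_criteria" then "Sc"
    else if PySem.Str.isIn "feature" content then "Features"
    else if PySem.Str.isIn "style" content then "Styles"
    else "Core"
  let blocks := names.map (fun s =>
    "@" ++ s ++ "\n" ++ PySem.Str.join "\n" (pvBlockBody s values nlp) ++ "\n")
  PySem.Str.join "\n" (("// MCO " ++ ft ++ "\n") :: blocks) ++ "\n"

-- ===== PRECONDITION & SPEC =====
def Spec_update_values_and_nlp (content : String) (values : List (String × String)) (nlp : List (String × String)) (out : String) : Prop := out = update_values_and_nlp_alt content values nlp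
instance (content : String) (values : List (String × String)) (nlp : List (String × String)) (out : String) : Decidable (Spec_update_values_and_nlp content values nlp out) := by unfold Spec_update_values_and_nlp; infer_instance

-- ===== CLAIM (what is proved, stated in full; the proofs are below) =====
def Claim_equal_update_values_and_nlp : Prop := ∀ (content : String) (values : List (String × String)) (nlp : List (String × String)), Dom_update_values_and_nlp content values nlp → Spec_update_values_and_nlp content values nlp (update_values_and_nlp content values nlp)

-- ===== LEMMAS AND PROOFS =====
theorem keys_condInsert (d : PySem.Dict String String) (c : Option String) (v : String) :
    ((if pvTruthy c then d.insert (c.getD "") v else d).keys)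
      = PySem.Set.update d.keys (c.toList.filter (fun n => !(n == ""))) := by
  cases c with
  | none => simp [pvTruthy, PySem.Set.update]
  | some s =>
    by_cases hs : s = ""
    · subst hs; simp [pvTruthy, PySem.Set.update]
    · simp only [pvTruthy, Option.getD_some, Option.toList_some, List.filter_cons]
      rw [if_pos (by simp [hs]), if_pos (by simp [hs])]
      simp only [List.filter_nil, PySem.Set.update, List.foldl_cons, List.foldl_nil, PySem.Set.add]
      by_cases hk : d.contains s = true
      · rw [PySem.Dict.keys_insert_of_contains d v hk]
        rw [if_pos]
        rw [PySem.Dict.contains_eq_decide_mem_keys] at hk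
        simp at hk
        simp [hk]
      · have hk' : d.contains s = false := by simpa using hk
        rw [PySem.Dict.keys_insert_of_not_contains d v hk']
        rw [if_neg]
        rw [PySem.Dict.contains_eq_decide_mem_keys] at hk'
        simp at hk'
        simp [hk']

theorem nodup_condInsert (d : PySem.Dict String String) (c : Option String) (v : String)
    (hd : d.keys.Nodup) :
    ((if pvTruthy c then d.insert (c.getD "") v else d).keys).Nodup := by
  split
  · exact PySem.Dict.nodup_keys_insert _ _ _ hd
  · exact hd

theorem update_update {α : Type} [BEq α] (s : PySem.Set α) (xs ys : List α) :
    PySem.Set.update (PySem.Set.update s xs) ys = PySem.Set.update s (xs ++ ys) := by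
  simp [PySem.Set.update, List.foldl_append]

theorem keys_parse (lines : List String) :
    ∀ (d : PySem.Dict String String) (c : Option String) (a : List String), d.keys.Nodup →
    (pvFinal (lines.foldl pvStep (d, c, a))).keys
      = PySem.Set.update d.keys
          ((c.toList ++ (lines.filter (fun l => PySem.Str.startswith l "@")).map pvName).filter
            (fun n => !(n == ""))) := by
  induction lines with
  | nil =>
    intro d c a hd
    simp only [List.foldl_nil, List.filter_nil, List.map_nil, List.append_nil]
    exact keys_condInsert d c _
  | cons line rest ih =>
    intro d c a hd
    simp only [List.foldl_cons, List.filter_cons]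
    by_cases h1 : PySem.Str.startswith line "@" = true
    · rw [if_pos (by simpa [PySem.Str.startswith] using h1)]
      have hstep : pvStep (d, c, a) line =
          ((if pvTruthy c then d.insert (c.getD "") (PySem.Str.join "\n" a) else d),
           some (pvName line),
           (if ((PySem.Str.splitMax? line " " 1).getD []).length > 1
            then (if pvTruthy c then ([] : List String) else a) ++ [((PySem.Str.splitMax? line " " 1).getD []).getD 1 ""]
            else (if pvTruthy c then ([] : List String) else a))) := by
        simp only [pvStep, pvName, h1, if_pos]
        split <;> simp
      rw [hstep, ih _ _ _ (nodup_condInsert d c _ hd)]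
      rw [keys_condInsert d c _, update_update]
      congr 1
      simp [List.filter_append]
    · rw [if_neg (by simpa [PySem.Str.startswith] using h1)]
      have hstep : ∃ a', pvStep (d, c, a) line = (d, c, a') := by
        simp only [pvStep, h1]
        split
        · exact absurd ‹_› (by simp)
        · split
          · split <;> exact ⟨_, rfl⟩
          · split <;> exact ⟨_, rfl⟩
      obtain ⟨a', ha'⟩ := hstep
      rw [ha', ih _ _ _ hd]

theorem keys_parse_eq (content : String) :
    (parse_snlp_file content).keys
      = PySem.List.dedup
          (((((PySem.Str.split? content "\n").getD []).filter
              (fun ln => PySem.Str.startswith ln "@")).map pvName).filter (fun n => !(n == ""))) := by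
  rw [parse_snlp_file, keys_parse _ _ _ _ (by simp [PySem.Dict.keys_empty])]
  rw [PySem.Dict.keys_empty, PySem.Set.update_nil_left, PySem.List.dedup_eq_ofList]
  rfl

-- A's updated_sections loop body equals insert of the joined pvBlockBody
theorem updated_items (sections : PySem.Dict String String) (values nlp : List (String × String))
    (hn : sections.keys.Nodup) :
    (sections.items.foldl (fun (u : PySem.Dict String String) p =>
      u.insert p.1 (PySem.Str.join "\n"
        (match pvLookup? nlp p.1 with
         | some t =>
             (match pvLookup? values p.1 with
              | some v => [] ++ [v]
              | none => []) ++ List.map (fun l => ">" ++ l) ((PySem.Str.split? t "\n").getD [])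
         | none =>
             match pvLookup? values p.1 with
             | some v => [] ++ [v]
             | none => []))) PySem.Dict.empty).items
      = sections.items.map (fun p => (p.1, PySem.Str.join "\n" (pvBlockBody p.1 values nlp))) := by
  have hfun : (fun (u : PySem.Dict String String) (p : String × String) =>
      u.insert p.1 (PySem.Str.join "\n"
        (match pvLookup? nlp p.1 with
         | some t =>
             (match pvLookup? values p.1 with
              | some v => [] ++ [v]
              | none => []) ++ List.map (fun l => ">" ++ l) ((PySem.Str.split? t "\n").getD [])
         | none =>
             match pvLookup? values p.1 with
             | some v => [] ++ [v]
             | none => [])))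
      = (fun (u : PySem.Dict String String) (p : String × String) =>
          u.insert p.1 (PySem.Str.join "\n" (pvBlockBody p.1 values nlp))) := by
    funext u p
    simp only [pvBlockBody]
    cases pvLookup? values p.1 <;> cases pvLookup? nlp p.1 <;> simp
  rw [hfun]
  rw [PySem.Dict.items_foldl_insert_fresh sections.items Prod.fst
        (fun p => PySem.Str.join "\n" (pvBlockBody p.1 values nlp)) PySem.Dict.empty
        (fun a _ => PySem.Dict.contains_empty _) (by simpa [PySem.Dict.keys] using hn)]
  simp [PySem.Dict.empty]

theorem goFlat (c : Char) : ∀ (fuel : Nat) (l cur : List Char) (acc : List (List Char)) (A : List Char),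
    l.length ≤ fuel →
    (PySem.Chars.splitOn.go [c] fuel l cur acc).foldl (fun a p => a ++ (p ++ [c])) A
      = A ++ (acc.reverse.flatMap (fun p => p ++ [c])) ++ cur.reverse ++ l ++ [c] := by
  intro fuel
  induction fuel with
  | zero =>
    intro l cur acc A h
    have : l = [] := List.eq_nil_of_length_eq_zero (Nat.le_zero.mp h)
    subst this
    simp [PySem.Chars.splitOn.go, ← List.map_reverse, List.flatMap_def]
  | succ fuel ih =>
    intro l cur acc A h
    cases l with
    | nil => simp [PySem.Chars.splitOn.go, ← List.map_reverse, List.flatMap_def]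
    | cons ch rest =>
      rw [PySem.Chars.splitOn.go]
      by_cases hc : c = ch
      · subst hc
        simp only [List.isPrefixOf, BEq.rfl, Bool.true_and, if_pos]
        rw [ih _ _ _ _ (by simpa using Nat.le_of_succ_le_succ h)]
        simp
      · have : [c].isPrefixOf (ch :: rest) = false := by
          simp [List.isPrefixOf, hc]
        rw [this]
        simp only [Bool.false_eq_true, if_false]
        rw [ih _ _ _ _ (by simpa using Nat.le_of_succ_le_succ h)]
        simp

theorem splitOnFlat (c : Char) (s A : List Char) :
    (PySem.Chars.splitOn s [c]).foldl (fun a p => a ++ (p ++ [c])) A = A ++ s ++ [c] := by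
  rw [PySem.Chars.splitOn, goFlat c (s.length + 1) s [] [] A (by omega)]
  simp

-- fold over strings vs fold over their char lists
theorem foldl_toList (parts : List String) : ∀ (acc : String),
    (parts.foldl (fun a l => a ++ (l ++ "\n")) acc).toList
      = (parts.map String.toList).foldl (fun a p => a ++ (p ++ ['\n'])) acc.toList := by
  induction parts with
  | nil => intro acc; simp
  | cons p rest ih =>
    intro acc
    simp only [List.foldl_cons, List.map_cons, ih]
    congr 1
    simp

theorem strInnerFold (sc acc : String) :
    ((PySem.Str.split? sc "\n").getD []).foldl (fun a l => a ++ (l ++ "\n")) acc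
      = acc ++ sc ++ "\n" := by
  have hb := PySem.Str.split?_map sc "\n"
  rw [show PySem.Chars.split? sc.toList "\n".toList = some (PySem.Chars.splitOn sc.toList ['\n']) by
        simp [PySem.Chars.split?]] at hb
  cases hps : PySem.Str.split? sc "\n" with
  | none => rw [hps] at hb; simp at hb
  | some ps =>
    rw [hps] at hb
    simp only [Option.map_some, Option.some.injEq] at hb
    apply String.ext
    rw [show (some ps).getD [] = ps from rfl]
    have := foldl_toList ps acc
    rw [this, hb, splitOnFlat]
    simp

theorem gen_fold_toList (ps : List (String × String)) : ∀ (acc : String),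
    (ps.foldl (fun content p =>
      ((PySem.Str.split? p.2 "\n").getD []).foldl (fun a l => a ++ (l ++ "\n"))
        (content ++ "@" ++ p.1 ++ "\n") ++ "\n") acc).toList
      = acc.toList ++ ps.flatMap (fun p => '@' :: (p.1.toList ++ '\n' :: (p.2.toList ++ ['\n', '\n']))) := by
  induction ps with
  | nil => intro acc; simp
  | cons p rest ih =>
    intro acc
    rw [List.foldl_cons, strInnerFold, ih]
    simp [List.flatMap_cons]

theorem generate_toList (sections : PySem.Dict String String) (ft : String) :
    (generate_snlp_file sections ft).toList
      = ("// MCO " ++ pvCapitalize ft ++ "\n\n").toList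
        ++ sections.items.flatMap (fun p => '@' :: (p.1.toList ++ '\n' :: (p.2.toList ++ ['\n', '\n']))) := by
  rw [generate_snlp_file]
  have hf : (fun (content : String) (p : String × String) =>
      let content := content ++ "@" ++ p.1 ++ "\n"
      let lines := (PySem.Str.split? p.2 "\n").getD []
      let content := lines.foldl (fun content line =>
        if PySem.Str.startswith line ">" then content ++ (line ++ "\n") else content ++ (line ++ "\n")) content
      content ++ "\n")
      = (fun (content : String) (p : String × String) =>
        ((PySem.Str.split? p.2 "\n").getD []).foldl (fun a l => a ++ (l ++ "\n"))
          (content ++ "@" ++ p.1 ++ "\n") ++ "\n") := by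
    funext content p
    simp only [ite_self]
  rw [hf]
  exact gen_fold_toList sections.items _

theorem joinShift (bs : List String) (h : String) :
    (PySem.Str.join "\n" (h :: bs)).toList ++ ['\n']
      = h.toList ++ '\n' :: bs.flatMap (fun b => b.toList ++ ['\n']) := by
  induction bs generalizing h with
  | nil => simp [PySem.Str.toList_join, PySem.Chars.join_singleton]
  | cons b rest ih =>
    rw [PySem.Str.toList_join]
    simp only [List.map_cons]
    rw [show ("\n".toList) = ['\n'] from rfl, PySem.Chars.join_cons_cons]
    have hb := ih b
    rw [PySem.Str.toList_join] at hb
    simp only [List.map_cons, show ("\n".toList) = ['\n'] from rfl] at hb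
    simp only [List.flatMap_cons]
    simp [hb]

theorem cap_facts : pvCapitalize "sc" = "Sc" ∧ pvCapitalize "features" = "Features" ∧
    pvCapitalize "styles" = "Styles" ∧ pvCapitalize "core" = "Core" := by
  refine ⟨?_, ?_, ?_, ?_⟩ <;> decide

theorem main_eq (content : String) (values nlp : List (String × String)) :
    update_values_and_nlp content values nlp = update_values_and_nlp_alt content values nlp := by
  apply String.ext
  simp only [update_values_and_nlp, update_values_and_nlp_alt]
  rw [generate_toList]
  have hkeys := keys_parse_eq content
  set names := PySem.List.dedup
      (List.filter (fun n => !n == "")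
        (List.map pvName
          (List.filter (fun ln => PySem.Str.startswith ln "@")
            ((PySem.Str.split? content "\n").getD [])))) with hnames
  have hnn : names.Nodup := by
    rw [hnames, PySem.List.dedup_eq_ofList]; exact PySem.Set.nodup_ofList _
  have hsn : (parse_snlp_file content).keys.Nodup := by rw [hkeys]; exact hnn
  rw [updated_items _ values nlp hsn]
  have hcond : ((parse_snlp_file content).contains "success_criteria") = names.contains "success_criteria" := by
    rw [PySem.Dict.contains_eq_decide_mem_keys, hkeys]
    simp
  rw [hcond]
  have hmapfst : (parse_snlp_file content).items.map Prod.fst = names := by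
    simpa [PySem.Dict.keys] using hkeys
  rw [List.flatMap_map]
  have hflat : (parse_snlp_file content).items.flatMap
        (fun a => '@' ::
          ((a.1, PySem.Str.join "\n" (pvBlockBody a.1 values nlp)).1.toList ++
            '\n' :: ((a.1, PySem.Str.join "\n" (pvBlockBody a.1 values nlp)).2.toList ++ ['\n', '\n'])))
      = names.flatMap
          (fun s => '@' :: (s.toList ++ '\n' :: ((PySem.Str.join "\n" (pvBlockBody s values nlp)).toList ++ ['\n', '\n']))) := by
    rw [← hmapfst, List.flatMap_map]
  rw [hflat]
  -- right-hand side
  conv_rhs => rw [String.toList_append, show ("\n".toList) = ['\n'] from rfl, joinShift]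
  rw [List.flatMap_map]
  have hblocks : names.flatMap
      (fun a => ("@" ++ a ++ "\n" ++ PySem.Str.join "\n" (pvBlockBody a values nlp) ++ "\n").toList ++ ['\n'])
      = names.flatMap
          (fun s => '@' :: (s.toList ++ '\n' :: ((PySem.Str.join "\n" (pvBlockBody s values nlp)).toList ++ ['\n', '\n']))) := by
    apply List.flatMap_congr
    intro s _
    simp [String.toList_append]
  rw [hblocks]
  obtain ⟨c1, c2, c3, c4⟩ := cap_facts
  split_ifs <;> simp [c1, c2, c3, c4]

-- ===== VERDICT (by name: the statement is the Claim_ definition above) =====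
theorem update_values_and_nlp_spec : Claim_equal_update_values_and_nlp := by
  intro content values nlp _
  unfold Spec_update_values_and_nlp
  exact main_eq content values nlp
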